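-- pv_equiv track=rewrite | github.com/ZefCo/Thesis | ML/WindowCounts.py | nucleotide_permutations
-- ===== SOURCE A (Python) =====
-- import itertools
--
-- def nucleotide_permutations(sequence: str = "ACGT", length: int = 3) -> dict:
--     nuc_perm = dict()
--
--     if len(sequence) < length:
--         return None
--
--     perms = itertools.product(sequence, repeat=length)
--     for p in perms:
--
--         key = ""
--         for n in p:
--             key = f"{key}{n}"
--
--         nuc_perm[key] = 0
--
--     return nuc_perm
-- ===== SOURCE B (Python) =====
-- def nucleotide_permutations(sequence: str = "ACGT", length: int = 3) -> dict:
--     if len(sequence) < length: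
--         return None
--     m = len(sequence)
--     nuc_perm = dict()
--     for i in range(m ** length):
--         key = ""
--         x = i
--         for _ in range(length):
--             key = sequence[x % m] + key
--             x = x // m
--         nuc_perm[key] = 0
--     return nuc_perm
-- ===== Notes on version B (the rewrite author's own statement) =====
-- stated objective: alternative
-- what changed: Replaces itertools.product enumeration by integer unranking: one loop over range(len(sequence)**length) decoding each index i as a base-m numeral whose digits (least significant appended leftward-last, i.e. last character varies fastest) select characters of sequence.
import Mathlib
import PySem

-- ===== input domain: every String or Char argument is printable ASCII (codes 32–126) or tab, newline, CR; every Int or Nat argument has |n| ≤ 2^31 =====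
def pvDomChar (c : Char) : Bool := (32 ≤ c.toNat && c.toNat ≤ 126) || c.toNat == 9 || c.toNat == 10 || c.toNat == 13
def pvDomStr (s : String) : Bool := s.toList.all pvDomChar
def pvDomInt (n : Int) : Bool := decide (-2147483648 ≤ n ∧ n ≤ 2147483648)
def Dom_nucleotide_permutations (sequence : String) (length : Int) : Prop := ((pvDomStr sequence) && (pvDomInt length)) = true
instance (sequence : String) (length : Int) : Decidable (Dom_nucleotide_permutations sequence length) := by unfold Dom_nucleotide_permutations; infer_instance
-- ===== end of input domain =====

-- B replaces itertools.product enumeration by integer unranking: each i in range(m**length)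
-- is decoded as a base-m numeral selecting characters of sequence; alternative algorithm, same cost.

-- ===== PORT A =====
-- itertools.product(sequence, repeat=length): leftmost position varies slowest
def pvProdA (cs : List Char) : Nat → List (List Char)
  | 0 => [[]]
  | n + 1 => cs.flatMap (fun c => (pvProdA cs n).map (fun t => c :: t))

def nucleotide_permutations (sequence : String) (length : Int) : Option (List (String × Int)) :=
  let nuc_perm : PySem.Dict String Int := PySem.Dict.empty
  if PySem.Str.len sequence < length then
    none
  else
    -- length < 0 raises ValueError in Python (excluded by Pre_); .toNat there is unconstrained
    let perms := pvProdA sequence.toList length.toNat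
    let d := perms.foldl (fun d p =>
        let key := p.foldl (fun k n => k.push n) ""
        d.insert key 0) nuc_perm
    some d.items

-- ===== PORT B =====
def nucleotide_permutations_alt (sequence : String) (length : Int) : Option (List (String × Int)) :=
  if PySem.Str.len sequence < length then
    none
  else
    let m : Int := PySem.Str.len sequence
    -- m ** length: length < 0 raises in Python (excluded by Pre_); .toNat there is unconstrained
    let d := (PySem.List.pyRange 0 (m ^ length.toNat) 1).foldl (fun d i =>
        let st := (PySem.List.pyRange 0 length 1).foldl
          (fun (st : String × Int) _ =>
            -- sequence[x % m] + key; the index x % m is always in range (0 ≤ x % m < m = len)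
            (String.ofList (PySem.List.pyGetD sequence.toList (PySem.Int.mod st.2 m) 'a' :: st.1.toList),
             PySem.Int.floordiv st.2 m)) ("", i)
        d.insert st.1 0) (PySem.Dict.empty : PySem.Dict String Int)
    some d.items

-- ===== PRECONDITION & SPEC =====
-- Pre_ excludes negative length, where Python A raises ValueError (itertools.product rejects repeat < 0)
-- and B raises too (m ** length is a float there).
def Pre_nucleotide_permutations (sequence : String) (length : Int) : Prop := 0 ≤ length
instance (sequence : String) (length : Int) : Decidable (Pre_nucleotide_permutations sequence length) := by unfold Pre_nucleotide_permutations; infer_instance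

def pvWitness_nucleotide_permutations : String × Int := ("ACGT", 2)

def Spec_nucleotide_permutations (sequence : String) (length : Int) (out : Option (List (String × Int))) : Prop := out = nucleotide_permutations_alt sequence length
instance (sequence : String) (length : Int) (out : Option (List (String × Int))) : Decidable (Spec_nucleotide_permutations sequence length out) := by unfold Spec_nucleotide_permutations; infer_instance

-- ===== CLAIM (what is proved, stated in full; the proofs are below) =====
def Claim_equal_nucleotide_permutations : Prop := ∀ (sequence : String) (length : Int), Dom_nucleotide_permutations sequence length → Pre_nucleotide_permutations sequence length → Spec_nucleotide_permutations sequence length (nucleotide_permutations sequence length)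

-- ===== LEMMAS AND PROOFS =====

-- the key A builds from a tuple
def pvKeyOf (t : List Char) : String := t.foldl (fun k n => k.push n) ""

theorem pvPush_ofList (acc : List Char) (c : Char) :
    (String.ofList acc).push c = String.ofList (acc ++ [c]) := String.toList_inj.mp (by simp)

theorem pvFoldl_push (t acc : List Char) :
    t.foldl String.push (String.ofList acc) = String.ofList (acc ++ t) := by
  induction t generalizing acc with
  | nil => simp
  | cons c t ih => rw [List.foldl_cons, pvPush_ofList, ih]; simp

theorem pvKeyOf_eq_mk (t : List Char) : pvKeyOf t = String.ofList t := by
  simpa [pvKeyOf] using pvFoldl_push t []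

-- product can equally be expanded at the LAST position
theorem pvProdA_snoc (cs : List Char) (n : Nat) :
    pvProdA cs (n + 1) = (pvProdA cs n).flatMap (fun t => cs.map (fun c => t ++ [c])) := by
  induction n with
  | zero =>
    simp only [pvProdA]
    induction cs with
    | nil => simp
    | cons c cs ihc => simpa using ihc
  | succ n ih =>
    have L : pvProdA cs (n + 1 + 1)
        = cs.flatMap (fun c => ((pvProdA cs n).flatMap (fun t => cs.map (fun x => t ++ [x]))).map (fun t => c :: t)) := by
      rw [show pvProdA cs (n + 1 + 1) = cs.flatMap (fun c => (pvProdA cs (n + 1)).map (fun t => c :: t)) from rfl, ih]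
    rw [L, show pvProdA cs (n + 1) = cs.flatMap (fun c => (pvProdA cs n).map (fun t => c :: t)) from rfl]
    simp [List.map_flatMap, List.flatMap_map, List.flatMap_assoc, Function.comp_def]

-- base-m decoding of an index: digits least-significant first, each prepended, so the
-- most significant digit ends up leftmost (last character varies fastest, like product)
def pvDec (cs : List Char) : Nat → Nat → List Char
  | 0, _ => []
  | n + 1, x => pvDec cs n (x / cs.length) ++ [cs.getD (x % cs.length) 'a']

-- a fold that ignores the list elements is an iterate
theorem pvFoldl_ignore {σ α : Type} (f : σ → σ) (l : List α) (s : σ) :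
    l.foldl (fun s _ => f s) s = f^[l.length] s := by
  induction l generalizing s with
  | nil => simp
  | cons a l ih => simpa [Function.iterate_succ_apply] using ih (f s)

-- B's inner loop computes pvDec
theorem pvIter (cs : List Char) (L : Nat) :
    ∀ (acc : List Char) (x : Nat),
      (fun (st : String × Int) =>
        (String.ofList (PySem.List.pyGetD cs (PySem.Int.mod st.2 (cs.length : Int)) 'a' :: st.1.toList),
         PySem.Int.floordiv st.2 (cs.length : Int)))^[L] (String.ofList acc, (x : Nat))
      = (String.ofList (pvDec cs L x ++ acc), ((x / cs.length ^ L : Nat) : Int)) := by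
  induction L with
  | zero => intro acc x; simp [pvDec]
  | succ L ih =>
    intro acc x
    rw [Function.iterate_succ_apply]
    simp only [PySem.Int.mod_natCast, PySem.Int.floordiv_natCast, PySem.List.pyGetD_natCast,
      String.toList_ofList]
    rw [ih (cs.getD (x % cs.length) 'a' :: acc) (x / cs.length)]
    rw [show pvDec cs (L + 1) x = pvDec cs L (x / cs.length) ++ [cs.getD (x % cs.length) 'a'] from rfl]
    rw [Nat.div_div_eq_div_mul, ← pow_succ']
    simp

theorem pvRange_mul (a b : Nat) :
    List.range (a * b) = (List.range a).flatMap (fun q => (List.range b).map (fun r => q * b + r)) := by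
  induction a with
  | zero => simp
  | succ a ih =>
    rw [Nat.succ_mul, List.range_add, ih, List.range_succ]
    simp [Nat.add_comm]

theorem pvMap_getD_range (cs : List Char) :
    (List.range cs.length).map (fun r => cs.getD r 'a') = cs := by
  apply List.ext_getElem
  · simp
  · intro i h1 h2
    simp [List.getD, List.getElem?_eq_getElem h2]

-- decoding every index in range(m^L) yields exactly the product tuples, in order
theorem pvKeys (cs : List Char) (L : Nat) :
    (List.range (cs.length ^ L)).map (pvDec cs L) = pvProdA cs L := by
  induction L with
  | zero => simp [pvDec, pvProdA]
  | succ L ih =>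
    rw [pow_succ, pvRange_mul, pvProdA_snoc, ← ih]
    rw [List.map_flatMap, List.flatMap_map]
    apply List.flatMap_congr  -- congruence under membership
    intro q _
    rw [List.map_map]
    have h1 : ∀ r ∈ List.range cs.length,
        (pvDec cs (L + 1) ∘ fun r => q * cs.length + r) r
          = pvDec cs L q ++ [cs.getD r 'a'] := by
      intro r hr
      have hr' : r < cs.length := List.mem_range.mp hr
      have hm : 0 < cs.length := Nat.lt_of_le_of_lt (Nat.zero_le r) hr'
      have hdiv : (q * cs.length + r) / cs.length = q := by
        rw [Nat.mul_comm, Nat.mul_add_div hm, Nat.div_eq_of_lt hr', Nat.add_zero]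
      have hmod : (q * cs.length + r) % cs.length = r := by
        rw [Nat.mul_add_mod', Nat.mod_eq_of_lt hr']
      simp [pvDec, hdiv, hmod]
    rw [List.map_congr_left h1]
    generalize pvDec cs L q = t
    conv_rhs => rw [← pvMap_getD_range cs]
    simp [List.map_map, Function.comp_def]

-- ===== VERDICT (by name: the statement is the Claim_ definition above) =====
theorem nucleotide_permutations_spec : Claim_equal_nucleotide_permutations := by
  intro sequence length _ hpre
  unfold Spec_nucleotide_permutations nucleotide_permutations nucleotide_permutations_alt
  by_cases h : PySem.Str.len sequence < length
  · rw [if_pos h, if_pos h]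
  · rw [if_neg h, if_neg h]
    dsimp only
    set cs := sequence.toList with hcs
    set L := length.toNat with hL
    have hlen : PySem.Str.len sequence = (cs.length : Int) := PySem.Str.len_eq sequence
    -- B's outer index list is range(m^L)
    have hrangeO : PySem.List.pyRange 0 ((PySem.Str.len sequence) ^ L) 1
        = (List.range (cs.length ^ L)).map (fun k : Nat => ((k : Nat) : Int)) := by
      rw [PySem.List.pyRange_one, hlen]
      have hc : ((cs.length : Int) ^ L - 0).toNat = cs.length ^ L := by
        rw [show ((cs.length : Int) ^ L - 0) = ((cs.length ^ L : Nat) : Int) by push_cast; ring,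
          Int.toNat_natCast]
      rw [hc]
      simp
    -- B's per-index key is the decoded tuple
    have hkey_i : ∀ k : Nat,
        ((PySem.List.pyRange 0 length 1).foldl
          (fun (st : String × Int) _ =>
            (String.ofList (PySem.List.pyGetD cs (PySem.Int.mod st.2 (PySem.Str.len sequence)) 'a' :: st.1.toList),
             PySem.Int.floordiv st.2 (PySem.Str.len sequence))) ("", (k : Int))).1
          = String.ofList (pvDec cs L k) := by
      intro k
      rw [hlen,
        pvFoldl_ignore (fun (st : String × Int) =>
          (String.ofList (PySem.List.pyGetD cs (PySem.Int.mod st.2 (cs.length : Int)) 'a' :: st.1.toList),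
           PySem.Int.floordiv st.2 (cs.length : Int))) (PySem.List.pyRange 0 length 1),
        show (PySem.List.pyRange 0 length 1).length = L by
          rw [PySem.List.length_pyRange_one]; omega,
        show ("" : String) = String.ofList [] from rfl, pvIter cs L [] k]
      simp
    -- the two key lists coincide
    have hkeys : (pvProdA cs L).map (fun p => List.foldl (fun k n => k.push n) "" p)
        = (PySem.List.pyRange 0 ((PySem.Str.len sequence) ^ L) 1).map (fun i =>
            ((PySem.List.pyRange 0 length 1).foldl
              (fun (st : String × Int) _ =>
                (String.ofList (PySem.List.pyGetD cs (PySem.Int.mod st.2 (PySem.Str.len sequence)) 'a' :: st.1.toList),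
                 PySem.Int.floordiv st.2 (PySem.Str.len sequence))) ("", i)).1) := by
      rw [hrangeO, List.map_map,
        show (fun p : List Char => List.foldl (fun k n => k.push n) "" p)
          = (fun p : List Char => String.ofList p) from funext pvKeyOf_eq_mk,
        ← pvKeys cs L, List.map_map]
      simp only [Function.comp_def]
      exact List.map_congr_left (fun k _ => (hkey_i k).symm)
    -- both sides fold the same insertions over the same key list
    congr 1
    have hA : ((pvProdA cs L).map (fun p => List.foldl (fun k n => k.push n) "" p)).foldl
          (fun (d : PySem.Dict String Int) key => d.insert key 0) PySem.Dict.empty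
        = (pvProdA cs L).foldl
          (fun d p => d.insert (List.foldl (fun k n => k.push n) "" p) 0) PySem.Dict.empty := by
      rw [List.foldl_map]
    have hB : ((PySem.List.pyRange 0 ((PySem.Str.len sequence) ^ L) 1).map (fun i =>
            ((PySem.List.pyRange 0 length 1).foldl
              (fun (st : String × Int) _ =>
                (String.ofList (PySem.List.pyGetD cs (PySem.Int.mod st.2 (PySem.Str.len sequence)) 'a' :: st.1.toList),
                 PySem.Int.floordiv st.2 (PySem.Str.len sequence))) ("", i)).1)).foldl
          (fun (d : PySem.Dict String Int) key => d.insert key 0) PySem.Dict.empty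
        = (PySem.List.pyRange 0 ((PySem.Str.len sequence) ^ L) 1).foldl
          (fun d i => d.insert ((PySem.List.pyRange 0 length 1).foldl
              (fun (st : String × Int) _ =>
                (String.ofList (PySem.List.pyGetD cs (PySem.Int.mod st.2 (PySem.Str.len sequence)) 'a' :: st.1.toList),
                 PySem.Int.floordiv st.2 (PySem.Str.len sequence))) ("", i)).1 0) PySem.Dict.empty := by
      rw [List.foldl_map]
    rw [← hA, ← hB, hkeys]
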